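-- pv_equiv track=rewrite | github.com/mskrss/background-pingu | logparsing.py | get_mods_type
-- ===== SOURCE A (Python) =====
-- def get_mods_type(mods):
--     # 0 - no mods, 1 - mods but no fabric mods, 2 - fabric mods but no mcsr mods, 3 - mcsr mods
--     mcsr_mods = ['worldpreview','anchiale','sleepbackground','StatsPerWorld','z-buffer-fog',
--                 'tab-focus','setspawn','SpeedRunIGT','atum','standardsettings','forceport',
--                 'lazystronghold','antiresourcereload','extra-options','chunkcacher',
--                 'serverSideRNG','peepopractice','fast-reset']
--     fabric_mods = ['Fabric','voyager','fabric']
--     if len(mods) == 0: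
--         return 0
--     if any(any(mcsr_mod in mod for mcsr_mod in mcsr_mods) for mod in mods):
--         return 3
--     if any(any(fabric_mod in mod for fabric_mod in fabric_mods) for mod in mods):
--         return 2
--     return 1
-- ===== SOURCE B (Python) =====
-- def get_mods_type(mods):
--     # 0 - no mods, 1 - mods but no fabric mods, 2 - fabric mods but no mcsr mods, 3 - mcsr mods
--     mcsr_mods = ['worldpreview','anchiale','sleepbackground','StatsPerWorld','z-buffer-fog',
--                 'tab-focus','setspawn','SpeedRunIGT','atum','standardsettings','forceport',
--                 'lazystronghold','antiresourcereload','extra-options','chunkcacher',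
--                 'serverSideRNG','peepopractice','fast-reset']
--     fabric_mods = ['Fabric','voyager','fabric']
--     if len(mods) == 0:
--         return 0
--     found_fabric = False
--     for mod in mods:
--         if any(p in mod for p in mcsr_mods):
--             return 3
--         found_fabric = found_fabric or any(p in mod for p in fabric_mods)
--     return 2 if found_fabric else 1
-- ===== Notes on version B (the rewrite author's own statement) =====
-- stated objective: alternative
-- what changed: Replaced A's two separate full-list any() scans with a single traversal that returns 3 on the first mcsr hit and maintains a found_fabric flag, deciding 2 vs 1 after the loop.
import Mathlib
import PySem

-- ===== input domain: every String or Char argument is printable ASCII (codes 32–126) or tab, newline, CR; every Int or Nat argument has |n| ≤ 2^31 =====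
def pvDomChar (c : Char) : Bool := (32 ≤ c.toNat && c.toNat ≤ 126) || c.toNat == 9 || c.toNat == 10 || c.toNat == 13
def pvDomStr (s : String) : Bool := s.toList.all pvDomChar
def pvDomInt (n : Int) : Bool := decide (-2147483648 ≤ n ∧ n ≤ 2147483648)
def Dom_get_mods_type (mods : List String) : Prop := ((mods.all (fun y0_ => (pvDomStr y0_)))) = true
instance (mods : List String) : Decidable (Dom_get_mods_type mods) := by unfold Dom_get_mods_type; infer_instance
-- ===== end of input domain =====

-- B replaces A's two separate full-list any() scans with one traversal keeping a found_fabric flag (alternative decomposition, same cost).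

-- ===== PORT A =====
def pvMcsrMods : List String := ["worldpreview","anchiale","sleepbackground","StatsPerWorld","z-buffer-fog",
  "tab-focus","setspawn","SpeedRunIGT","atum","standardsettings","forceport",
  "lazystronghold","antiresourcereload","extra-options","chunkcacher",
  "serverSideRNG","peepopractice","fast-reset"]
def pvFabricMods : List String := ["Fabric","voyager","fabric"]

def get_mods_type (mods : List String) : Int :=
  if mods.length = 0 then 0
  else if mods.any (fun mod => pvMcsrMods.any (fun m => PySem.Str.isIn m mod)) then 3
  else if mods.any (fun mod => pvFabricMods.any (fun m => PySem.Str.isIn m mod)) then 2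
  else 1

-- ===== PORT B =====
def altLoop (mods : List String) (foundFabric : Bool) : Int :=
  match mods with
  | [] => if foundFabric then 2 else 1
  | mod :: rest =>
    if pvMcsrMods.any (fun m => PySem.Str.isIn m mod) then 3
    else altLoop rest (foundFabric || pvFabricMods.any (fun m => PySem.Str.isIn m mod))

def get_mods_type_alt (mods : List String) : Int :=
  if mods.length = 0 then 0
  else altLoop mods false

-- ===== PRECONDITION & SPEC =====
def Spec_get_mods_type (mods : List String) (out : Int) : Prop := out = get_mods_type_alt mods
instance (mods : List String) (out : Int) : Decidable (Spec_get_mods_type mods out) := by unfold Spec_get_mods_type; infer_instance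

-- ===== CLAIM (what is proved, stated in full; the proofs are below) =====
def Claim_equal_get_mods_type : Prop := ∀ (mods : List String), Dom_get_mods_type mods → Spec_get_mods_type mods (get_mods_type mods)

-- ===== LEMMAS AND PROOFS =====
theorem altLoop_char (mods : List String) (f : Bool) :
    altLoop mods f =
      if mods.any (fun mod => pvMcsrMods.any (fun m => PySem.Str.isIn m mod)) then 3
      else if f || mods.any (fun mod => pvFabricMods.any (fun m => PySem.Str.isIn m mod)) then 2
      else 1 := by
  induction mods generalizing f with
  | nil => simp [altLoop]
  | cons mod rest ih =>
    simp only [altLoop, List.any_cons]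
    by_cases hm : (pvMcsrMods.any fun m => PySem.Str.isIn m mod) = true
    · rw [if_pos hm, if_pos (by rw [hm, Bool.true_or])]
    · have hm' : (pvMcsrMods.any fun m => PySem.Str.isIn m mod) = false :=
        Bool.eq_false_iff.mpr hm
      rw [if_neg hm, ih, hm', Bool.false_or, Bool.or_assoc]
      exact rfl

-- ===== VERDICT (by name: the statement is the Claim_ definition above) =====
theorem get_mods_type_spec : Claim_equal_get_mods_type := by
  intro mods _
  unfold Spec_get_mods_type get_mods_type get_mods_type_alt
  by_cases h : mods.length = 0
  · simp [h]
  · simp [h, altLoop_char]
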